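-- pv_equiv track=rewrite | github.com/cs534project/ML_Project | model_backup.py | ana
-- ===== SOURCE A (Python) =====
-- def ana(l,lh):
-- 	res = [0,0,0,0]
--
-- 	for i in range(len(l)):
-- 		if lh[i] == -1:
-- 			if l[i] == -1:
-- 				res[0] += 1
-- 			else:
-- 				res[3] += 1
-- 		elif l[i] == 1:
-- 			res[1] += 1
-- 		else:
-- 			res[2] += 1
--
-- 	return res
-- ===== SOURCE B (Python) =====
-- def ana(l, lh):
--     b0 = sum(1 for i in range(len(l)) if lh[i] == -1 and l[i] == -1)
--     b3 = sum(1 for i in range(len(l)) if lh[i] == -1 and l[i] != -1)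
--     b1 = sum(1 for i in range(len(l)) if lh[i] != -1 and l[i] == 1)
--     b2 = sum(1 for i in range(len(l)) if lh[i] != -1 and l[i] != 1)
--     return [b0, b1, b2, b3]
-- ===== Notes on version B (the rewrite author's own statement) =====
-- stated objective: alternative
-- what changed: Replaces the single pass that branches into a mutable 4-slot result list with four independent counting scans, one per bucket, assembled into the result at the end.
import Mathlib
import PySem

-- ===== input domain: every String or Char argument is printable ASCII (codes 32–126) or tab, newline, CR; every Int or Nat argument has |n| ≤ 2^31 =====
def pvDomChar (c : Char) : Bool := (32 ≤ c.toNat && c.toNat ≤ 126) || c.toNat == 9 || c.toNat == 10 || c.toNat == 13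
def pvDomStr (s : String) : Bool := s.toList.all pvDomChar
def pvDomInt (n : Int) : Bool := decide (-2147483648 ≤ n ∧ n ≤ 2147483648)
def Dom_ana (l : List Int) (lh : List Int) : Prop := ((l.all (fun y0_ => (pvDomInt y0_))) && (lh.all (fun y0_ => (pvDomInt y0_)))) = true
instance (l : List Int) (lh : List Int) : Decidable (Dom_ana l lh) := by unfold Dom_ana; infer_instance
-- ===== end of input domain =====

-- B replaces A's single pass with a mutable 4-slot result by four independent counting
-- scans, one per bucket (objective: alternative). Same O(n) cost.

-- ===== PORT A =====
-- lh[i] / l[i] via pyGet?; the .getD 0 is never reached inside Pre_ana (indices i with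
-- 0 ≤ i < len l are in range for l, and for lh because Pre_ana gives len l ≤ len lh).
def anaGet (xs : List Int) (i : Int) : Int := (PySem.List.pyGet? xs i).getD 0

def anaStep (l : List Int) (lh : List Int) (res : List Int) (i : Int) : List Int :=
  if anaGet lh i == -1 then
    if anaGet l i == -1 then res.set 0 (res.getD 0 0 + 1)
    else res.set 3 (res.getD 3 0 + 1)
  else if anaGet l i == 1 then res.set 1 (res.getD 1 0 + 1)
  else res.set 2 (res.getD 2 0 + 1)

def ana (l : List Int) (lh : List Int) : List Int :=
  (PySem.List.pyRange 0 (l.length : Int) 1).foldl (anaStep l lh) [0, 0, 0, 0]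

-- ===== PORT B =====
def ana_alt (l : List Int) (lh : List Int) : List Int :=
  let idxs := PySem.List.pyRange 0 (l.length : Int) 1
  let b0 : Int := idxs.countP (fun i => (anaGet lh i == -1) && (anaGet l i == -1))
  let b3 : Int := idxs.countP (fun i => (anaGet lh i == -1) && !(anaGet l i == -1))
  let b1 : Int := idxs.countP (fun i => !(anaGet lh i == -1) && (anaGet l i == 1))
  let b2 : Int := idxs.countP (fun i => !(anaGet lh i == -1) && !(anaGet l i == 1))
  [b0, b1, b2, b3]

-- ===== PRECONDITION & SPEC =====
-- A indexes lh at every position of l, so it raises IndexError when lh is shorter than l.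
def Pre_ana (l : List Int) (lh : List Int) : Prop := l.length ≤ lh.length
instance (l : List Int) (lh : List Int) : Decidable (Pre_ana l lh) := by unfold Pre_ana; infer_instance
def pvWitness_ana : List Int × List Int := ([-1, 1, 0], [-1, -1, 1])

def Spec_ana (l : List Int) (lh : List Int) (out : List Int) : Prop := out = ana_alt l lh
instance (l : List Int) (lh : List Int) (out : List Int) : Decidable (Spec_ana l lh out) := by unfold Spec_ana; infer_instance

-- ===== CLAIM (what is proved, stated in full; the proofs are below) =====
def Claim_equal_ana : Prop := ∀ (l : List Int) (lh : List Int), Dom_ana l lh → Pre_ana l lh → Spec_ana l lh (ana l lh)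

-- ===== LEMMAS AND PROOFS =====

-- A's fold over any index list, started from an arbitrary 4-slot state, adds the four bucket counts.
lemma ana_fold_char (l lh : List Int) (idxs : List Int) (a b c d : Int) :
    idxs.foldl (anaStep l lh) [a, b, c, d] =
      [a + (idxs.countP (fun i => (anaGet lh i == -1) && (anaGet l i == -1)) : Int),
       b + (idxs.countP (fun i => !(anaGet lh i == -1) && (anaGet l i == 1)) : Int),
       c + (idxs.countP (fun i => !(anaGet lh i == -1) && !(anaGet l i == 1)) : Int),
       d + (idxs.countP (fun i => (anaGet lh i == -1) && !(anaGet l i == -1)) : Int)] := by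
  induction idxs generalizing a b c d with
  | nil => simp
  | cons i rest ih =>
    simp only [List.foldl_cons, List.countP_cons, anaStep]
    by_cases hlh : anaGet lh i == -1 <;> by_cases hl1 : anaGet l i == -1 <;>
      by_cases hl2 : anaGet l i == 1 <;>
      simp [hlh, hl1, hl2, List.set, List.getD, ih] <;> ring_nf

-- ===== VERDICT (by name: the statement is the Claim_ definition above) =====
theorem ana_spec : Claim_equal_ana := by
  intro l lh _ _
  unfold Spec_ana ana ana_alt
  rw [ana_fold_char]
  simp
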